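-- pv_equiv track=rewrite | github.com/Sky-zzt/lintcodePractice | pythonAlgorithm/highlevel/枚举区间.py | maxsubarrary
-- ===== SOURCE A (Python) =====
-- def maxsubarrary(nums):
--     s = set()
--     import sys
--     globalmax = -sys.maxsize
--     ans = 0
--     for i in range(len(nums)):
--         for j in range(i + 1):
--             for k in range(j + 1):
--                 s.add((k, j))
--     return s
-- ===== SOURCE B (Python) =====
-- def maxsubarrary(nums):
--     n = len(nums)
--     pairs = []
--     k = 0
--     j = 0
--     while j < n:
--         pairs.append((k, j))
--         if k == j:
--             k = 0
--             j += 1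
--         else:
--             k += 1
--     return set(pairs)
-- ===== Notes on version B (the rewrite author's own statement) =====
-- stated objective: faster
-- what changed: Replaced the triple nested loop (which re-inserts every pair up to n times into the set) by a single odometer-style while loop that advances one (k, j) cursor and visits each pair with k <= j < n exactly once, in the same insertion order; intended as faster (O(n^2) vs O(n^3)), measured 8.91x at n=256, unconfirmed at n=1024 where both timed out.
import Mathlib
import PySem

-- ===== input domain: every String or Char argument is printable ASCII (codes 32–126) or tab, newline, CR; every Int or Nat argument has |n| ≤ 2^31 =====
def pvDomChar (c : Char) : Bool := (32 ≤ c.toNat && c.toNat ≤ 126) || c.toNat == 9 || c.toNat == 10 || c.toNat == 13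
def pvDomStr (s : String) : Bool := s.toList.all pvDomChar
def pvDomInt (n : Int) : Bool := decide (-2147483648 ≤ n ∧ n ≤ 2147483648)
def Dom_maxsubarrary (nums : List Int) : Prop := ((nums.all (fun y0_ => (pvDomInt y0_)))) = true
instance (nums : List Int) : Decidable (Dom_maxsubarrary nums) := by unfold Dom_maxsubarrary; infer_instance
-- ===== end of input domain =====

-- B replaces A's triple nested loop (which re-inserts every pair up to n times) by a single
-- odometer-style while loop over one (k, j) cursor visiting each pair exactly once (intended as faster; measured 8.91x at n=256 in a timing run).

-- ===== PORT A =====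
def maxsubarrary (nums : List Int) : List (Int × Int) :=
  -- s = set(); for i in range(len(nums)): for j in range(i+1): for k in range(j+1): s.add((k, j)); return s
  (PySem.List.pyRange 0 (nums.length : Int) 1).foldl (fun s i =>
    (PySem.List.pyRange 0 (i + 1) 1).foldl (fun s j =>
      (PySem.List.pyRange 0 (j + 1) 1).foldl (fun s k => PySem.Set.add s (k, j)) s) s)
    PySem.Set.empty

-- ===== PORT B =====
-- the while loop of Source B: state is the cursor (k, j) plus the accumulated pairs;
-- fuel is a totality guard only (maxsubarrary_alt supplies enough fuel that it is never exhausted)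
def pvWalk (fuel : Nat) (n : Nat) (k j : Nat) (acc : List (Int × Int)) : List (Int × Int) :=
  match fuel with
  | 0 => acc
  | fuel + 1 =>
    if j < n then
      let acc2 := acc ++ [((k : Int), (j : Int))]
      if k == j then pvWalk fuel n 0 (j + 1) acc2
      else pvWalk fuel n (k + 1) j acc2
    else acc

def maxsubarrary_alt (nums : List Int) : List (Int × Int) :=
  -- n = len(nums); pairs = []; k = j = 0; while j < n: append (k,j); advance cursor; return set(pairs)
  PySem.Set.ofList (pvWalk ((nums.length + 1) * (nums.length + 1)) nums.length 0 0 [])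

-- ===== PRECONDITION & SPEC =====
def Spec_maxsubarrary (nums : List Int) (out : List (Int × Int)) : Prop := out = maxsubarrary_alt nums
instance (nums : List Int) (out : List (Int × Int)) : Decidable (Spec_maxsubarrary nums out) := by unfold Spec_maxsubarrary; infer_instance

-- ===== CLAIM (what is proved, stated in full; the proofs are below) =====
def Claim_equal_maxsubarrary : Prop := ∀ (nums : List Int), Dom_maxsubarrary nums → Spec_maxsubarrary nums (maxsubarrary nums)

-- ===== LEMMAS AND PROOFS =====

-- the canonical triangle: pairs (k, j) with k ≤ j < n, grouped by j, k increasing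
def pvRow (j : Nat) : List (Int × Int) := (List.range (j + 1)).map (fun k : Nat => ((k : Int), (j : Int)))
def pvTri (n : Nat) : List (Int × Int) := (List.range n).flatMap pvRow

theorem pvRow_mem {j : Nat} {p : Int × Int} : p ∈ pvRow j ↔ (0 ≤ p.1 ∧ p.1 ≤ (j : Int) ∧ p.2 = (j : Int)) := by
  obtain ⟨a, b⟩ := p
  simp only [pvRow, List.mem_map, List.mem_range, Prod.mk.injEq]
  constructor
  · rintro ⟨k, hk, rfl, rfl⟩
    exact ⟨by omega, by omega, rfl⟩
  · rintro ⟨h0, hle, rfl⟩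
    exact ⟨a.toNat, by omega, by omega, rfl⟩

theorem pvTri_mem {n : Nat} {p : Int × Int} : p ∈ pvTri n ↔ (0 ≤ p.1 ∧ p.1 ≤ p.2 ∧ 0 ≤ p.2 ∧ p.2 < (n : Int)) := by
  simp only [pvTri, List.mem_flatMap, List.mem_range]
  constructor
  · rintro ⟨j, hj, hm⟩
    obtain ⟨h0, hle, h2⟩ := pvRow_mem.mp hm
    exact ⟨h0, by omega, by omega, by omega⟩
  · rintro ⟨h0, hle, h20, h2n⟩
    refine ⟨p.2.toNat, by omega, pvRow_mem.mpr ⟨h0, by omega, by omega⟩⟩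

theorem pvRow_nodup (j : Nat) : (pvRow j).Nodup := by
  refine List.Nodup.map ?_ (List.nodup_range)
  intro a b h
  simpa using congrArg Prod.fst h

theorem pvTri_succ (n : Nat) : pvTri (n + 1) = pvTri n ++ pvRow n := by
  simp [pvTri, List.range_succ]

theorem pvTri_nodup (n : Nat) : (pvTri n).Nodup := by
  induction n with
  | zero => simp [pvTri]
  | succ n ih =>
    rw [pvTri_succ]
    refine List.Nodup.append ih (pvRow_nodup n) ?_
    intro p hp hq
    obtain ⟨_, _, _, h2⟩ := pvTri_mem.mp hp
    obtain ⟨_, _, hj⟩ := pvRow_mem.mp hq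
    omega

-- ===== A-side lemmas =====

theorem foldl_fix {α β : Type} (f : β → α → β) (s : β) (l : List α)
    (h : ∀ x ∈ l, f s x = s) : l.foldl f s = s := by
  induction l with
  | nil => rfl
  | cons x l ih =>
    simp only [List.foldl_cons, h x (List.mem_cons_self)]
    exact ih (fun y hy => h y (List.mem_cons_of_mem x hy))

theorem update_of_subset {α : Type} [BEq α] [LawfulBEq α] (s : PySem.Set α) (l : List α)
    (h : ∀ x ∈ l, x ∈ s) : l.foldl PySem.Set.add s = s := by
  refine foldl_fix _ _ _ (fun x hx => PySem.Set.add_of_mem (h x hx))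

theorem update_of_disjoint {α : Type} [BEq α] [LawfulBEq α] (s : PySem.Set α) (l : List α)
    (hl : l.Nodup) (h : ∀ x ∈ l, x ∉ s) : l.foldl PySem.Set.add s = s ++ l := by
  induction l generalizing s with
  | nil => simp
  | cons x l ih =>
    simp only [List.foldl_cons]
    rw [PySem.Set.add_of_not_mem (h x (List.mem_cons_self))]
    rw [ih (s ++ [x]) hl.of_cons]
    · simp
    · intro y hy
      simp only [List.mem_append, List.mem_singleton]
      rintro (hs | rfl)
      · exact h y (List.mem_cons_of_mem x hy) hs
      · exact (List.nodup_cons.mp hl).1 hy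

-- the k-loop at column j, started on a state already containing row j, is a no-op
theorem kloop_fix (j : Nat) (s : PySem.Set (Int × Int)) (h : ∀ p ∈ pvRow j, p ∈ s) :
    (PySem.List.pyRange 0 ((j : Int) + 1) 1).foldl (fun s k => PySem.Set.add s (k, (j : Int))) s = s := by
  have : (PySem.List.pyRange 0 ((j : Int) + 1) 1).foldl (fun s k => PySem.Set.add s (k, (j : Int))) s
      = (pvRow j).foldl PySem.Set.add s := by
    have hr : PySem.List.pyRange 0 ((j : Int) + 1) 1 = (List.range (j + 1)).map (fun k : Nat => (k : Int)) := by
      have h := PySem.List.pyRange_zero_natCast (j + 1)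
      rwa [show ((j + 1 : Nat) : Int) = (j : Int) + 1 by push_cast; ring] at h
    rw [hr, pvRow, List.foldl_map, List.foldl_map]
  rw [this]
  exact update_of_subset _ _ h

-- the k-loop at column j, started on pvTri j, appends row j
theorem kloop_new (j : Nat) :
    (PySem.List.pyRange 0 ((j : Int) + 1) 1).foldl (fun s k => PySem.Set.add s (k, (j : Int))) (pvTri j)
      = pvTri (j + 1) := by
  have hr : PySem.List.pyRange 0 ((j : Int) + 1) 1 = (List.range (j + 1)).map (fun k : Nat => (k : Int)) := by
    have h := PySem.List.pyRange_zero_natCast (j + 1)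
    rwa [show ((j + 1 : Nat) : Int) = (j : Int) + 1 by push_cast; ring] at h
  rw [hr]
  have : ((List.range (j + 1)).map (fun k : Nat => (k : Int))).foldl (fun s k => PySem.Set.add s (k, (j : Int))) (pvTri j)
      = (pvRow j).foldl PySem.Set.add (pvTri j) := by
    rw [pvRow, List.foldl_map, List.foldl_map]
  rw [this, update_of_disjoint _ _ (pvRow_nodup j), ← pvTri_succ]
  intro p hp hmem
  obtain ⟨_, _, hj⟩ := pvRow_mem.mp hp
  obtain ⟨_, _, _, h2⟩ := pvTri_mem.mp hmem
  omega

-- A's body at i, started on pvTri i, produces pvTri (i+1)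
theorem iter_step (i : Nat) :
    (PySem.List.pyRange 0 ((i : Int) + 1) 1).foldl (fun s j =>
      (PySem.List.pyRange 0 (j + 1) 1).foldl (fun s k => PySem.Set.add s (k, j)) s) (pvTri i)
      = pvTri (i + 1) := by
  have hr : PySem.List.pyRange 0 ((i : Int) + 1) 1
      = PySem.List.pyRange 0 (i : Int) 1 ++ [(i : Int)] := by
    have := PySem.List.pyRange_one_succ_right (a := 0) (b := (i : Int)) (by positivity)
    simpa using this
  rw [hr, List.foldl_append]
  have hfix : (PySem.List.pyRange 0 (i : Int) 1).foldl (fun s j =>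
      (PySem.List.pyRange 0 (j + 1) 1).foldl (fun s k => PySem.Set.add s (k, j)) s) (pvTri i) = pvTri i := by
    refine foldl_fix _ _ _ (fun j hj => ?_)
    obtain ⟨hj0, hjn⟩ := (PySem.List.mem_pyRange_one).mp hj
    obtain ⟨jn, rfl⟩ := Int.eq_ofNat_of_zero_le hj0
    refine kloop_fix jn _ (fun p hp => ?_)
    obtain ⟨h0, hle, h2⟩ := pvRow_mem.mp hp
    exact pvTri_mem.mpr ⟨h0, by omega, by omega, by omega⟩
  rw [hfix]
  simpa using kloop_new i

-- A computes pvTri n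
theorem portA_eq (n : Nat) :
    (PySem.List.pyRange 0 (n : Int) 1).foldl (fun s i =>
      (PySem.List.pyRange 0 (i + 1) 1).foldl (fun s j =>
        (PySem.List.pyRange 0 (j + 1) 1).foldl (fun s k => PySem.Set.add s (k, j)) s) s)
      PySem.Set.empty = pvTri n := by
  induction n with
  | zero => simp [PySem.List.pyRange_zero, pvTri, PySem.Set.empty]
  | succ n ih =>
    have hr : PySem.List.pyRange 0 ((n : Int) + 1) 1
        = PySem.List.pyRange 0 (n : Int) 1 ++ [(n : Int)] := by
      have := PySem.List.pyRange_one_succ_right (a := 0) (b := (n : Int)) (by positivity)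
      simpa using this
    rw [show ((n + 1 : Nat) : Int) = (n : Int) + 1 by push_cast; ring, hr, List.foldl_append, ih]
    exact iter_step n

-- ===== B-side lemmas =====

-- the tail of row j starting at column k
def pvRowFrom (k j : Nat) : List (Int × Int) :=
  (List.range (j + 1 - k)).map (fun i : Nat => (((k + i : Nat) : Int), (j : Int)))

theorem pvRowFrom_zero (j : Nat) : pvRowFrom 0 j = pvRow j := by
  simp [pvRowFrom, pvRow]

theorem pvRowFrom_cons {k j : Nat} (h : k < j) :
    pvRowFrom k j = ((k : Int), (j : Int)) :: pvRowFrom (k + 1) j := by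
  have h1 : j + 1 - k = (j - k) + 1 := by omega
  have h2 : j + 1 - (k + 1) = j - k := by omega
  rw [pvRowFrom, pvRowFrom, h1, h2, List.range_succ_eq_map, List.map_cons, List.map_map]
  congr 1
  refine List.map_congr_left (fun i _ => ?_)
  simp only [Function.comp_apply, Prod.mk.injEq, Nat.succ_eq_add_one]
  constructor
  · push_cast; ring
  · trivial

theorem pvRowFrom_self (j : Nat) : pvRowFrom j j = [((j : Int), (j : Int))] := by
  simp [pvRowFrom]

-- remaining triangle from row j on
def pvTriFrom (j n : Nat) : List (Int × Int) := (List.range' j (n - j)).flatMap pvRow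

theorem pvTriFrom_zero (n : Nat) : pvTriFrom 0 n = pvTri n := by
  simp [pvTriFrom, pvTri, List.range_eq_range']

theorem pvTriFrom_stop {j n : Nat} (h : ¬ j < n) : pvTriFrom j n = [] := by
  have : n - j = 0 := by omega
  simp [pvTriFrom, this]

theorem pvTriFrom_cons {j n : Nat} (h : j < n) :
    pvTriFrom j n = pvRow j ++ pvTriFrom (j + 1) n := by
  have h1 : n - j = (n - (j + 1)) + 1 := by omega
  rw [pvTriFrom, pvTriFrom, h1, List.range'_succ, List.flatMap_cons]

-- the walk with exhausted row condition stops immediately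
theorem pvWalk_stop (fuel n j k : Nat) (acc : List (Int × Int)) (h : ¬ j < n) :
    pvWalk fuel n k j acc = acc := by
  cases fuel with
  | zero => rfl
  | succ fuel => simp [pvWalk, h]

-- the walk finishes the current row then continues at (0, j+1)
theorem pvWalk_row (d : Nat) : ∀ (fuel k j : Nat) (acc : List (Int × Int)),
    j - k = d → k ≤ j → j < n' → d + 1 ≤ fuel →
    pvWalk fuel n' k j acc = pvWalk (fuel - (d + 1)) n' 0 (j + 1) (acc ++ pvRowFrom k j) := by
  induction d with
  | zero =>
    intro fuel k j acc hd hkj hjn hf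
    have hk : k = j := by omega
    obtain ⟨f, rfl⟩ : ∃ f, fuel = f + 1 := ⟨fuel - 1, by omega⟩
    subst hk
    simp [pvWalk, hjn, pvRowFrom_self]
  | succ d ih =>
    intro fuel k j acc hd hkj hjn hf
    have hklt : k < j := by omega
    obtain ⟨f, rfl⟩ : ∃ f, fuel = f + 1 := ⟨fuel - 1, by omega⟩
    have hne : (k == j) = false := by simp; omega
    simp only [pvWalk, if_pos hjn, hne, if_neg Bool.false_ne_true]
    rw [ih f (k + 1) j _ (by omega) (by omega) hjn (by omega)]
    rw [pvRowFrom_cons hklt]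
    have hfe : f - (d + 1) = f + 1 - (d + 1 + 1) := by omega
    rw [hfe]
    simp

-- the walk from the start of row j, with fuel at least (n-j)(n+1), builds the remaining triangle
theorem pvWalk_tri (n : Nat) (m : Nat) : ∀ (fuel j : Nat) (acc : List (Int × Int)),
    n - j = m → m * (n + 1) ≤ fuel →
    pvWalk fuel n 0 j acc = acc ++ pvTriFrom j n := by
  induction m with
  | zero =>
    intro fuel j acc hm _
    have hj : ¬ j < n := by omega
    rw [pvWalk_stop _ _ _ _ _ hj, pvTriFrom_stop hj, List.append_nil]
  | succ m ih =>
    intro fuel j acc hm hf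
    have hjn : j < n := by omega
    have hfuel : j + 1 ≤ fuel := by
      have : (m + 1) * (n + 1) = m * (n + 1) + (n + 1) := by ring
      rw [this] at hf
      generalize m * (n + 1) = P at hf
      omega
    rw [pvWalk_row (n' := n) j fuel 0 j acc (by omega) (by omega) hjn (by omega)]
    rw [ih (fuel - (j + 1)) (j + 1) _ (by omega) ?_]
    · rw [pvRowFrom_zero, pvTriFrom_cons hjn, List.append_assoc]
    · have : (m + 1) * (n + 1) = m * (n + 1) + (n + 1) := by ring
      rw [this] at hf
      generalize m * (n + 1) = P at hf ⊢
      omega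

-- B computes pvTri n
theorem portB_eq (n : Nat) :
    PySem.Set.ofList (pvWalk ((n + 1) * (n + 1)) n 0 0 []) = pvTri n := by
  have hf : n * (n + 1) ≤ (n + 1) * (n + 1) :=
    Nat.mul_le_mul_right _ (Nat.le_succ n)
  rw [pvWalk_tri n n ((n + 1) * (n + 1)) 0 [] (by omega) hf, List.nil_append, pvTriFrom_zero]
  exact PySem.Set.ofList_eq_self_of_nodup _ (pvTri_nodup n)

-- ===== VERDICT (by name: the statement is the Claim_ definition above) =====
theorem maxsubarrary_spec : Claim_equal_maxsubarrary := by
  intro nums _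
  unfold Spec_maxsubarrary maxsubarrary maxsubarrary_alt
  rw [portA_eq, portB_eq]
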